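-- pv_equiv track=rewrite | github.com/Sachinv-dev/pum-calc | app.py | auto_detect_option
-- ===== SOURCE A (Python) =====
-- def auto_detect_option(components, threshold_data):
--     """
--     Automatically detect the option (R1, R2, etc.) based on components
--
--     Args:
--         components: List of component codes taken by student
--         threshold_data: Dictionary containing threshold data
--
--     Returns:
--         Tuple of (option_code, components_string) or (None, None)
--     """
--     user_comp_set = set(components)
--
--     for key in threshold_data.keys():
--         if key.endswith('_components'):
--             option_code = key.replace('_components', '')
--             components_str = threshold_data[key]
--             comp_parts = set([c.strip() for c in components_str.split(',')])
--
--             if user_comp_set == comp_parts: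
--                 return option_code, components_str
--
--     return None, None
-- ===== SOURCE B (Python) =====
-- def auto_detect_option(components, threshold_data):
--     index = {}
--     for key, value in threshold_data.items():
--         if key.endswith('_components'):
--             k = tuple(sorted({c.strip() for c in value.split(',')}))
--             if k not in index:
--                 index[k] = (key.replace('_components', ''), value)
--     return index.get(tuple(sorted(set(components))), (None, None))
-- ===== Notes on version B (the rewrite author's own statement) =====
-- stated objective: alternative
-- what changed: Instead of scanning the dict and comparing the input set against each candidate set, B builds in one pass an index keyed by the canonical (sorted distinct) component tuple, first candidate winning, and answers with a single lookup.
import Mathlib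
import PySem

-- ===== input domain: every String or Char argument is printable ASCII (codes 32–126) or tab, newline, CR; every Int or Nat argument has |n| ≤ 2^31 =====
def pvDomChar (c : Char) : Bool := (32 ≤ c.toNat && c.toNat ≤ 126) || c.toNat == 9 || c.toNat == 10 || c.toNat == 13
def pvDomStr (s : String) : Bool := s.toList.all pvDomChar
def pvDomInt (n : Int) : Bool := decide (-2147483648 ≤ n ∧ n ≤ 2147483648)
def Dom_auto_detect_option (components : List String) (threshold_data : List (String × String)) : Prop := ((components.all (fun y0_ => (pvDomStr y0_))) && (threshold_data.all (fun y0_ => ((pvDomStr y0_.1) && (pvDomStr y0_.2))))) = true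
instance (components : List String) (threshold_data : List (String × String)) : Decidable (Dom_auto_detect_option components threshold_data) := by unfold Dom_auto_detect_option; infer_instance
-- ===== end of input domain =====

-- B replaces A's per-entry set-equality scan by an index keyed by the canonical
-- (sorted distinct) component tuple, built once with first-candidate-wins, then a single lookup.

-- shared faithful subroutine: set of stripped parts of a comma-separated string
def pvParts (s : String) : List String :=
  ((PySem.Str.split? s ",").getD []).map PySem.Str.strip

-- ===== PORT A =====
-- the loop 'for key in threshold_data.keys(): …' of A; threshold_data[key] is the
-- dict lookup (always present, since key comes from keys(); getD "" is never the default)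
def pvGoA (threshold_data : List (String × String)) (userSet : PySem.Set String) :
    List String → Option String × Option String
  | [] => (none, none)
  | key :: rest =>
    if PySem.Str.endswith key "_components" then
      let optionCode := PySem.Str.replace key "_components" ""
      let componentsStr := ((PySem.Dict.mk threshold_data).get? key).getD ""
      let compParts := PySem.Set.ofList (pvParts componentsStr)
      if PySem.Set.equal userSet compParts then (some optionCode, some componentsStr)
      else pvGoA threshold_data userSet rest
    else pvGoA threshold_data userSet rest

def auto_detect_option (components : List String) (threshold_data : List (String × String)) : Option String × Option String :=
  pvGoA threshold_data (PySem.Set.ofList components) (PySem.Dict.keys (PySem.Dict.mk threshold_data))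

-- ===== PORT B =====
-- tuple(sorted(set(xs)))
def pvCanon (xs : List String) : List String :=
  PySem.List.sorted (PySem.Set.ofList xs) (fun x => x) false

def pvStep (d : PySem.Dict (List String) (Option String × Option String)) (kv : String × String) :
    PySem.Dict (List String) (Option String × Option String) :=
  if PySem.Str.endswith kv.1 "_components" then
    let k := pvCanon (pvParts kv.2)
    if d.contains k then d
    else d.insert k (some (PySem.Str.replace kv.1 "_components" ""), some kv.2)
  else d

def auto_detect_option_alt (components : List String) (threshold_data : List (String × String)) : Option String × Option String :=
  ((threshold_data.foldl pvStep PySem.Dict.empty).get? (pvCanon components)).getD (none, none)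

-- ===== PRECONDITION & SPEC =====
-- Pre_ only requires distinct keys in the association list: the Python argument is a
-- dict, which cannot carry duplicate keys, so this excludes no input Python A sees.
def Pre_auto_detect_option (components : List String) (threshold_data : List (String × String)) : Prop :=
  (threshold_data.map Prod.fst).Nodup
instance (components : List String) (threshold_data : List (String × String)) : Decidable (Pre_auto_detect_option components threshold_data) := by unfold Pre_auto_detect_option; infer_instance

def pvWitness_auto_detect_option : List String × (List (String × String)) :=
  (["A1", "B2"], [("R1_components", "A1, B2"), ("R2_components", "A1, C3")])

def Spec_auto_detect_option (components : List String) (threshold_data : List (String × String)) (out : Option String × Option String) : Prop := out = auto_detect_option_alt components threshold_data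
instance (components : List String) (threshold_data : List (String × String)) (out : Option String × Option String) : Decidable (Spec_auto_detect_option components threshold_data out) := by unfold Spec_auto_detect_option; infer_instance

-- ===== CLAIM (what is proved, stated in full; the proofs are below) =====
def Claim_equal_auto_detect_option : Prop := ∀ (components : List String) (threshold_data : List (String × String)), Dom_auto_detect_option components threshold_data → Pre_auto_detect_option components threshold_data → Spec_auto_detect_option components threshold_data (auto_detect_option components threshold_data)

-- ===== LEMMAS AND PROOFS =====

-- first entry of the list whose key ends in '_components' and whose part-set canonicalises to k
def pvHit (k : List String) : List (String × String) → Option (Option String × Option String)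
  | [] => none
  | (key, val) :: rest =>
    if PySem.Str.endswith key "_components" ∧ pvCanon (pvParts val) = k then
      some (some (PySem.Str.replace key "_components" ""), some val)
    else pvHit k rest

lemma pvFold_get? (td : List (String × String)) (k : List String) :
    ∀ d : PySem.Dict (List String) (Option String × Option String),
      ((td.foldl pvStep d).get? k) = ((d.get? k).or (pvHit k td)) := by
  induction td with
  | nil => intro d; simp [pvHit]
  | cons kv rest ih =>
    intro d
    obtain ⟨key, val⟩ := kv
    simp only [List.foldl_cons]
    rw [ih]
    simp only [pvStep, pvHit]
    by_cases he : PySem.Str.endswith key "_components" = true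
    · rw [if_pos he]
      by_cases hk : pvCanon (pvParts val) = k
      · subst hk
        rw [if_pos (And.intro he rfl)]
        by_cases hc : d.contains (pvCanon (pvParts val)) = true
        · have hs : (d.get? (pvCanon (pvParts val))).isSome := by
            rw [← PySem.Dict.contains_eq_isSome_get?]; exact hc
          obtain ⟨v, hv⟩ := Option.isSome_iff_exists.mp hs
          rw [if_pos hc, hv]
          simp [Option.or]
        · rw [if_neg hc]
          have hn : d.get? (pvCanon (pvParts val)) = none := by
            rw [Bool.not_eq_true] at hc
            have h2 := PySem.Dict.contains_eq_isSome_get? (d := d) (k := pvCanon (pvParts val))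
            rw [hc] at h2
            cases h : d.get? (pvCanon (pvParts val)) <;> simp [h] at h2 ⊢
          rw [PySem.Dict.get?_insert_self, hn]
          simp [Option.or]
      · have hni : ¬ (PySem.Str.endswith key "_components" = true ∧ pvCanon (pvParts val) = k) :=
          fun h => hk h.2
        by_cases hc : d.contains (pvCanon (pvParts val)) = true
        · rw [if_pos hc, if_neg hni]
        · rw [if_neg hc, if_neg hni]
          have hk' : k ≠ pvCanon (pvParts val) := fun h => hk h.symm
          rw [PySem.Dict.get?_insert, if_neg hk']
    · rw [if_neg he, if_neg (fun h => he h.1)]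

lemma pvEqual_iff_canon' (u : PySem.Set String) (hu : u.Nodup) (b : List String) :
    PySem.Set.equal u (PySem.Set.ofList b) = true ↔
      pvCanon b = PySem.List.sorted u (fun x => x) false := by
  rw [PySem.Set.equal_iff]
  rw [show pvCanon b = PySem.List.sorted (PySem.Set.ofList b) (fun x => x) false from rfl]
  rw [PySem.List.sorted_id_eq_sorted_id_iff_perm]
  constructor
  · intro h
    exact ((List.perm_ext_iff_of_nodup (PySem.Set.nodup_ofList b) hu).2
      (fun x => (h x).symm))
  · intro h x
    exact h.symm.mem_iff

-- the A-side scan, with the full-dict lookups resolved to each entry's own value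
lemma pvGoA_eq (td : List (String × String)) (u : PySem.Set String) (hu : u.Nodup)
    (l : List (String × String))
    (hl : ∀ p ∈ l, (PySem.Dict.mk td).get? p.1 = some p.2) :
    pvGoA td u (l.map Prod.fst) =
      (pvHit (PySem.List.sorted u (fun x => x) false) l).getD (none, none) := by
  induction l with
  | nil => simp [pvGoA, pvHit]
  | cons p rest ih =>
    obtain ⟨key, val⟩ := p
    have hget : (PySem.Dict.mk td).get? key = some val := hl (key, val) (by simp)
    have ih' := ih (fun q hq => hl q (by simp [hq]))
    simp only [List.map_cons]
    simp only [pvGoA, pvHit, hget, Option.getD_some]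
    by_cases he : PySem.Str.endswith key "_components" = true
    · rw [if_pos he]
      by_cases heq : PySem.Set.equal u (PySem.Set.ofList (pvParts val)) = true
      · have hcan := (pvEqual_iff_canon' u hu (pvParts val)).1 heq
        rw [if_pos heq, if_pos (And.intro he hcan)]
        rfl
      · have hcan : ¬ pvCanon (pvParts val) = PySem.List.sorted u (fun x => x) false :=
          fun h => heq ((pvEqual_iff_canon' u hu (pvParts val)).2 h)
        rw [if_neg heq, if_neg (fun h => hcan h.2)]
        exact ih'
    · rw [if_neg he, if_neg (fun h => he h.1)]
      exact ih'

theorem pv_main (components : List String) (threshold_data : List (String × String))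
    (hpre : (threshold_data.map Prod.fst).Nodup) :
    auto_detect_option components threshold_data = auto_detect_option_alt components threshold_data := by
  unfold auto_detect_option auto_detect_option_alt
  have hkeys : (PySem.Dict.mk threshold_data).keys = threshold_data.map Prod.fst := by
    simp [PySem.Dict.keys]
  have hnd : (PySem.Dict.mk threshold_data).keys.Nodup := by rw [hkeys]; exact hpre
  have hl : ∀ p ∈ threshold_data, (PySem.Dict.mk threshold_data).get? p.1 = some p.2 := by
    intro p hp
    obtain ⟨k, v⟩ := p
    exact PySem.Dict.get?_of_mem_items _ (by simpa [PySem.Dict.items] using hp) hnd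
  rw [hkeys, pvGoA_eq threshold_data _ (PySem.Set.nodup_ofList components) threshold_data hl,
    pvFold_get?]
  simp [pvCanon, Option.or]

-- ===== VERDICT (by name: the statement is the Claim_ definition above) =====
theorem auto_detect_option_spec : Claim_equal_auto_detect_option := by
  intro components threshold_data _ hpre
  unfold Spec_auto_detect_option
  exact pv_main components threshold_data hpre
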